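-- pv_equiv track=rewrite | github.com/moumq/opencompass_selfuse | opencompass/datasets/livebench.py | _remove_nonnumeric_chars_at_ends
-- ===== SOURCE A (Python) =====
-- def _remove_nonnumeric_chars_at_ends(s: str):
--     start_index = 0
--     while start_index < len(s) and not s[start_index].isdigit():
--         start_index += 1
--     end_index = start_index
--     while end_index < len(s) and s[end_index].isdigit():
--         end_index += 1
--     return s[start_index:end_index], len(s) - (end_index - start_index)
-- ===== SOURCE B (Python) =====
-- def _remove_nonnumeric_chars_at_ends(s: str):
--     run = ''
--     for c in s:
--         if c.isdigit():
--             run += c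
--         elif run:
--             break
--     return run, len(s) - len(run)
-- ===== Notes on version B (the rewrite author's own statement) =====
-- stated objective: simpler
-- what changed: Replaces the two index-tracking while loops and slicing with a single for-each pass that accumulates the first digit run and derives the removed-char count as len(s) - len(run).
import Mathlib
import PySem

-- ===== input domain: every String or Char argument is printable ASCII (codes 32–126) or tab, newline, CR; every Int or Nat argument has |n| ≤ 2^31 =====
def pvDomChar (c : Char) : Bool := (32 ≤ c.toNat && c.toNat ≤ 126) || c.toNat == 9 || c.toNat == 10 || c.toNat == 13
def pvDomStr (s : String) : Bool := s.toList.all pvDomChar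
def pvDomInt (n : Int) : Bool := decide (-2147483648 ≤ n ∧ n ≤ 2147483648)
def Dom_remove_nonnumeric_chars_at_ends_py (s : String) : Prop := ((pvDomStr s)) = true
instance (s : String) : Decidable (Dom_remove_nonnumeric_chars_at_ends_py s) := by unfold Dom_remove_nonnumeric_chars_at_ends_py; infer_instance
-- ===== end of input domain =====

-- B replaces A's two index-tracking while loops and slice with one for-each pass
-- accumulating the digit run and deriving the count as len(s) - len(run) (objective: simpler).

-- ===== PORT A =====
-- first while loop: advance start_index past leading non-digits
def pvAStart (cs : List Char) (i : Nat) : Nat :=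
  if h : i < cs.length then
    if PySem.Chars.isdigit (cs[i]'h) = false then pvAStart cs (i + 1) else i
  else i
termination_by cs.length - i
decreasing_by omega

-- second while loop: advance end_index over digits
def pvAEnd (cs : List Char) (i : Nat) : Nat :=
  if h : i < cs.length then
    if PySem.Chars.isdigit (cs[i]'h) = true then pvAEnd cs (i + 1) else i
  else i
termination_by cs.length - i
decreasing_by omega

def remove_nonnumeric_chars_at_ends_py (s : String) : String × Int :=
  let cs := s.toList
  let start_index := pvAStart cs 0
  let end_index := pvAEnd cs start_index
  (String.ofList (PySem.List.slice cs (some (start_index : Int)) (some (end_index : Int))),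
   (cs.length : Int) - ((end_index : Int) - (start_index : Int)))

-- ===== PORT B =====
-- the single for-loop with accumulator `run` and early break
def pvBLoop (cs : List Char) (run : List Char) : List Char :=
  match cs with
  | [] => run
  | c :: rest =>
    if PySem.Chars.isdigit c then pvBLoop rest (run ++ [c])
    else if run ≠ [] then run
    else pvBLoop rest run

def remove_nonnumeric_chars_at_ends_py_alt (s : String) : String × Int :=
  let run := pvBLoop s.toList []
  (String.ofList run, (s.toList.length : Int) - (run.length : Int))

-- ===== PRECONDITION & SPEC =====
def Spec_remove_nonnumeric_chars_at_ends_py (s : String) (out : String × Int) : Prop := out = remove_nonnumeric_chars_at_ends_py_alt s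
instance (s : String) (out : String × Int) : Decidable (Spec_remove_nonnumeric_chars_at_ends_py s out) := by unfold Spec_remove_nonnumeric_chars_at_ends_py; infer_instance

-- ===== CLAIM (what is proved, stated in full; the proofs are below) =====
def Claim_equal_remove_nonnumeric_chars_at_ends_py : Prop := ∀ (s : String), Dom_remove_nonnumeric_chars_at_ends_py s → Spec_remove_nonnumeric_chars_at_ends_py s (remove_nonnumeric_chars_at_ends_py s)

-- ===== LEMMAS AND PROOFS =====

theorem pvAStart_eq (cs : List Char) (i : Nat) :
    pvAStart cs i = i + ((cs.drop i).takeWhile (fun c => !PySem.Chars.isdigit c)).length := by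
  induction i using pvAStart.induct (cs := cs) with
  | case1 i h hd ih =>
    rw [pvAStart, dif_pos h, if_pos hd, ih, List.drop_eq_getElem_cons h,
      List.takeWhile_cons_of_pos (by simp [hd])]
    simp; omega
  | case2 i h hd =>
    rw [pvAStart, dif_pos h, if_neg hd, List.drop_eq_getElem_cons h,
      List.takeWhile_cons_of_neg (by simpa using hd)]
    simp
  | case3 i h =>
    rw [pvAStart, dif_neg h, List.drop_eq_nil_of_le (by omega)]
    simp

theorem pvAEnd_eq (cs : List Char) (i : Nat) :
    pvAEnd cs i = i + ((cs.drop i).takeWhile (fun c => PySem.Chars.isdigit c)).length := by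
  induction i using pvAEnd.induct (cs := cs) with
  | case1 i h hd ih =>
    rw [pvAEnd, dif_pos h, if_pos hd, ih, List.drop_eq_getElem_cons h,
      List.takeWhile_cons_of_pos (by simp [hd])]
    simp; omega
  | case2 i h hd =>
    rw [pvAEnd, dif_pos h, if_neg hd, List.drop_eq_getElem_cons h,
      List.takeWhile_cons_of_neg (by simpa using hd)]
    simp
  | case3 i h =>
    rw [pvAEnd, dif_neg h, List.drop_eq_nil_of_le (by omega)]
    simp

theorem pvBLoop_ne_nil (cs run : List Char) (h : run ≠ []) :
    pvBLoop cs run = run ++ cs.takeWhile (fun c => PySem.Chars.isdigit c) := by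
  induction cs generalizing run with
  | nil => simp [pvBLoop]
  | cons c rest ih =>
    rw [pvBLoop]
    by_cases hd : PySem.Chars.isdigit c
    · rw [if_pos hd, ih (run ++ [c]) (by simp), List.takeWhile_cons_of_pos (by simp [hd])]
      simp
    · rw [if_neg hd, if_pos h, List.takeWhile_cons_of_neg (by simp [hd])]
      simp

theorem pvBLoop_nil (cs : List Char) :
    pvBLoop cs [] =
      (cs.dropWhile (fun c => !PySem.Chars.isdigit c)).takeWhile (fun c => PySem.Chars.isdigit c) := by
  induction cs with
  | nil => simp [pvBLoop]
  | cons c rest ih =>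
    rw [pvBLoop]
    by_cases hd : PySem.Chars.isdigit c
    · rw [if_pos hd, show ([] : List Char) ++ [c] = [c] from rfl,
        pvBLoop_ne_nil rest [c] (by simp),
        List.dropWhile_cons_of_neg (by simp [hd]), List.takeWhile_cons_of_pos (by simp [hd])]
      simp
    · rw [if_neg hd, if_neg (by simp), ih, List.dropWhile_cons_of_pos (by simp [hd])]

theorem pv_run_eq (cs : List Char) :
    (cs.drop (pvAStart cs 0)).take (pvAEnd cs (pvAStart cs 0) - pvAStart cs 0) = pvBLoop cs [] ∧
      pvAEnd cs (pvAStart cs 0) - pvAStart cs 0 = (pvBLoop cs []).length := by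
  set si := pvAStart cs 0 with hsidef
  set ei := pvAEnd cs si with heidef
  have hsi : si = (cs.takeWhile (fun c => !PySem.Chars.isdigit c)).length := by
    simpa using pvAStart_eq cs 0
  have hdrop : cs.drop si = cs.dropWhile (fun c => !PySem.Chars.isdigit c) := by
    rw [hsi]
    set tw := cs.takeWhile (fun c => !PySem.Chars.isdigit c) with htw
    obtain ⟨t, ht⟩ := List.takeWhile_prefix (l := cs) (p := fun c => !PySem.Chars.isdigit c)
    rw [← htw] at ht
    have hts : t = cs.dropWhile (fun c => !PySem.Chars.isdigit c) := by
      have h2 : tw ++ cs.dropWhile (fun c => !PySem.Chars.isdigit c) = cs := by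
        rw [htw]; exact List.takeWhile_append_dropWhile
      have := ht.trans h2.symm
      exact (List.append_cancel_left this)
    conv_lhs => rw [← ht]
    rw [List.drop_left]
    exact hts
  have hei : ei - si = ((cs.drop si).takeWhile (fun c => PySem.Chars.isdigit c)).length := by
    have := pvAEnd_eq cs si
    omega
  have hrun : pvBLoop cs [] = (cs.drop si).takeWhile (fun c => PySem.Chars.isdigit c) := by
    rw [pvBLoop_nil, hdrop]
  refine ⟨?_, by rw [hrun, hei]⟩
  rw [hei, hrun]
  set dw := cs.drop si with hdw
  set tw2 := dw.takeWhile (fun c => PySem.Chars.isdigit c) with htw2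
  obtain ⟨t, ht⟩ := List.takeWhile_prefix (l := dw) (p := fun c => PySem.Chars.isdigit c)
  rw [← htw2] at ht
  conv_lhs => rw [← ht]
  rw [List.take_left]

-- ===== VERDICT (by name: the statement is the Claim_ definition above) =====
theorem remove_nonnumeric_chars_at_ends_py_spec : Claim_equal_remove_nonnumeric_chars_at_ends_py := by
  intro s _
  unfold Spec_remove_nonnumeric_chars_at_ends_py
  unfold remove_nonnumeric_chars_at_ends_py remove_nonnumeric_chars_at_ends_py_alt
  obtain ⟨h1, h2⟩ := pv_run_eq s.toList
  have hle : pvAStart s.toList 0 ≤ pvAEnd s.toList (pvAStart s.toList 0) := by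
    have := pvAEnd_eq s.toList (pvAStart s.toList 0); omega
  simp only [PySem.List.slice_natCast, h1]
  refine Prod.ext rfl ?_
  simp only []
  omega
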